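-- pv_equiv track=rewrite | github.com/NikolaT24/Data-Mining | npuzzle.py | inversion_parity
-- ===== SOURCE A (Python) =====
-- def inversion_parity(flat):
--     arr = [x for x in flat if x != 0]
--     p = 0
--     for i in range(len(arr)):
--         ai = arr[i]
--         for j in range(i + 1, len(arr)):
--             if arr[j] < ai:
--                 p ^= 1
--     return p
-- ===== SOURCE B (Python) =====
-- def inversion_parity(flat):
--     def merge(ls, rs):
--         i = j = c = 0
--         out = []
--         while i < len(ls) and j < len(rs):
--             if rs[j] < ls[i]:
--                 out.append(rs[j]); j += 1; c += len(ls) - i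
--             else:
--                 out.append(ls[i]); i += 1
--         out.extend(ls[i:]); out.extend(rs[j:])
--         return out, c
--
--     def msort(a):
--         if len(a) <= 1:
--             return a, 0
--         n = len(a) // 2
--         L, c1 = msort(a[:n])
--         R, c2 = msort(a[n:])
--         M, c3 = merge(L, R)
--         return M, c1 + c2 + c3
--
--     arr = [x for x in flat if x != 0]
--     _, c = msort(arr)
--     return c % 2
-- ===== Notes on version B (the rewrite author's own statement) =====
-- stated objective: faster
-- what changed: Replaced the O(n^2) nested index loops that xor a parity bit per inversion with a merge-sort that counts inversions during merging and returns the count mod 2.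
import Mathlib
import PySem

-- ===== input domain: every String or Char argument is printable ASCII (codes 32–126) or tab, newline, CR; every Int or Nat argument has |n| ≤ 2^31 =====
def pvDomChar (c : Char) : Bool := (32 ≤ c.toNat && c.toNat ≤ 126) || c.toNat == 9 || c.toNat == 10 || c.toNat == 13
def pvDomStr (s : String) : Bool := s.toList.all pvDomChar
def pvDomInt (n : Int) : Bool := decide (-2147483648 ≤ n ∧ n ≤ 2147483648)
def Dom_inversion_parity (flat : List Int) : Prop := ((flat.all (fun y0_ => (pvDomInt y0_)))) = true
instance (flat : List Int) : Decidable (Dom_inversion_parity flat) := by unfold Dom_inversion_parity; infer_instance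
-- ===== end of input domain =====

-- B replaces A's O(n^2) nested index loops by a merge sort that counts inversions while merging (return value only; neither mutates its input).

-- ===== PORT A =====
def inversion_parity (flat : List Int) : Int :=
  let arr := flat.filter (fun x => x ≠ 0)
  (PySem.List.pyRange 0 (arr.length : Int) 1).foldl
    (fun p i =>
      let ai := PySem.List.pyGetD arr i 0
      (PySem.List.pyRange (i + 1) (arr.length : Int) 1).foldl
        (fun q j => if PySem.List.pyGetD arr j 0 < ai then PySem.Int.bxor q 1 else q) p)
    0

-- ===== PORT B =====
-- merge of Source B: while loop over the two fronts becomes structural recursion on the two lists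
def mergeInv : List Int → List Int → List Int × Int
  | [], r => (r, 0)
  | a :: l, [] => (a :: l, 0)
  | a :: l, b :: r =>
    if b < a then
      let p := mergeInv (a :: l) r
      (b :: p.1, p.2 + ((a :: l).length : Int))
    else
      let p := mergeInv l (b :: r)
      (a :: p.1, p.2)
termination_by l r => l.length + r.length

def msortInv : List Int → List Int × Int
  | [] => ([], 0)
  | [x] => ([x], 0)
  | a :: b :: t =>
    let l := a :: b :: t
    let n := l.length / 2
    let p1 := msortInv (l.take n)
    let p2 := msortInv (l.drop n)
    let p3 := mergeInv p1.1 p2.1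
    (p3.1, p1.2 + p2.2 + p3.2)
termination_by l => l.length
decreasing_by
  · simp [List.length_take]; omega
  · simp; omega

def inversion_parity_alt (flat : List Int) : Int :=
  let arr := flat.filter (fun x => x ≠ 0)
  PySem.Int.mod (msortInv arr).2 2

-- ===== PRECONDITION & SPEC =====
def Spec_inversion_parity (flat : List Int) (out : Int) : Prop := out = inversion_parity_alt flat
instance (flat : List Int) (out : Int) : Decidable (Spec_inversion_parity flat out) := by unfold Spec_inversion_parity; infer_instance

-- ===== CLAIM (what is proved, stated in full; the proofs are below) =====
def Claim_equal_inversion_parity : Prop := ∀ (flat : List Int), Dom_inversion_parity flat → Spec_inversion_parity flat (inversion_parity flat)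


-- ===== LEMMAS AND PROOFS =====

-- number of inversions of a list (count over the head, then recurse)
def invc : List Int → ℕ
  | [] => 0
  | x :: xs => xs.countP (fun y => decide (y < x)) + invc xs

-- cross inversions between two blocks
def cross (ls rs : List Int) : ℕ := (rs.map (fun b => ls.countP (fun a => decide (b < a)))).sum

def par (k : ℕ) : Int := ((k % 2 : ℕ) : Int)

-- ---------- generic xor-loop lemmas (A side) ----------

theorem foldl_bxor_if {α : Type} (L : List α) (c : α → Prop) [DecidablePred c] (p : Int)
    (hp : p = 0 ∨ p = 1) :
    L.foldl (fun q x => if c x then PySem.Int.bxor q 1 else q) p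
      = PySem.Int.bxor p (par (L.countP (fun x => decide (c x)))) := by
  induction L generalizing p with
  | nil => simp [par, PySem.Int.bxor_zero]
  | cons x L ih =>
    simp only [List.foldl_cons, List.countP_cons]
    by_cases hc : c x
    · rw [if_pos hc, ih _ (by rcases hp with h | h <;> subst h <;> [right; left] <;> decide)]
      simp only [hc, decide_true, if_pos]
      rcases hp with h | h <;> subst h <;>
        rcases Nat.mod_two_eq_zero_or_one (L.countP (fun x => decide (c x))) with h2 | h2 <;>
        simp [par, Nat.add_mod, h2] <;> decide
    · rw [if_neg hc, ih _ hp]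
      simp [hc]

def gA (arr : List Int) (i : Int) : ℕ :=
  (PySem.List.pyRange (i + 1) (arr.length : Int) 1).countP
    (fun j => decide (PySem.List.pyGetD arr j 0 < PySem.List.pyGetD arr i 0))

theorem bxor_par_mem (p : Int) (hp : p = 0 ∨ p = 1) (m : ℕ) :
    PySem.Int.bxor p (par m) = 0 ∨ PySem.Int.bxor p (par m) = 1 := by
  rcases hp with h | h <;> subst h <;>
    rcases Nat.mod_two_eq_zero_or_one m with h2 | h2 <;> simp [par, h2] <;> decide

theorem bxor_par_par (p : Int) (hp : p = 0 ∨ p = 1) (a b : ℕ) :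
    PySem.Int.bxor (PySem.Int.bxor p (par a)) (par b) = PySem.Int.bxor p (par (a + b)) := by
  rcases hp with h | h <;> subst h <;>
    rcases Nat.mod_two_eq_zero_or_one a with h2 | h2 <;>
    rcases Nat.mod_two_eq_zero_or_one b with h3 | h3 <;>
    simp [par, Nat.add_mod, h2, h3] <;> decide

theorem outer_loop (arr : List Int) (L : List Int) (p : Int) (hp : p = 0 ∨ p = 1) :
    L.foldl (fun p i =>
        (PySem.List.pyRange (i + 1) (arr.length : Int) 1).foldl
          (fun q j => if PySem.List.pyGetD arr j 0 < PySem.List.pyGetD arr i 0 then PySem.Int.bxor q 1 else q) p) p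
      = PySem.Int.bxor p (par ((L.map (gA arr)).sum)) := by
  induction L generalizing p with
  | nil => simp [par, PySem.Int.bxor_zero]
  | cons i L ih =>
    simp only [List.foldl_cons, List.map_cons, List.sum_cons]
    rw [foldl_bxor_if _ _ _ hp, ih _ (bxor_par_mem p hp _), bxor_par_par p hp]
    rfl

-- ---------- index sums = invc (A side) ----------

theorem countP_range_getD (l : List Int) (P : Int → Bool) :
    ∀ s : ℕ, (List.range (l.length - s)).countP (fun m => P (l.getD (s + m) 0))
      = (l.drop s).countP P := by
  induction l with
  | nil => intro s; simp
  | cons x l ih =>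
    intro s
    cases s with
    | zero =>
      simp only [List.length_cons, Nat.sub_zero, List.drop_zero, List.range_succ_eq_map,
        List.countP_cons, List.countP_map, List.getD_cons_zero, Nat.zero_add]
      have ih0 := ih 0
      simp only [Nat.sub_zero, Nat.zero_add, List.drop_zero] at ih0
      have h2 : (List.range l.length).countP ((fun m => P ((x :: l).getD m 0)) ∘ Nat.succ)
          = (List.range l.length).countP (fun m => P (l.getD m 0)) := by
        apply List.countP_congr
        intro m _
        simp
      rw [h2, ih0]
    | succ s =>
      simp only [List.length_cons, Nat.succ_sub_succ, List.drop_succ_cons]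
      rw [← ih s]
      apply List.countP_congr
      intro m _
      have h3 : s + 1 + m = (s + m) + 1 := by omega
      rw [h3, List.getD_cons_succ]

theorem gA_natCast (arr : List Int) (k : ℕ) :
    gA arr (k : Int) = (arr.drop (k + 1)).countP (fun y => decide (y < arr.getD k 0)) := by
  unfold gA
  rw [PySem.List.pyRange_one, List.countP_map]
  have h1 : ((arr.length : Int) - ((k : Int) + 1)).toNat = arr.length - (k + 1) := by omega
  rw [h1, ← countP_range_getD arr (fun y => decide (y < arr.getD k 0)) (k + 1)]
  apply List.countP_congr
  intro m _
  have h2 : (k : Int) + 1 + (m : Int) = ((k + 1 + m : ℕ) : Int) := by push_cast; ring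
  simp only [Function.comp, h2, PySem.List.pyGetD_natCast]

theorem sum_icnt (l : List Int) :
    ((List.range l.length).map
      (fun k => (l.drop (k + 1)).countP (fun y => decide (y < l.getD k 0)))).sum = invc l := by
  induction l with
  | nil => simp [invc]
  | cons x xs ih =>
    simp only [List.length_cons, List.range_succ_eq_map, List.map_cons, List.map_map,
      List.sum_cons, invc]
    rw [← ih]
    congr 1

theorem sum_gA (arr : List Int) :
    ((PySem.List.pyRange 0 (arr.length : Int) 1).map (gA arr)).sum = invc arr := by
  rw [PySem.List.pyRange_one]
  have h1 : ((arr.length : Int) - 0).toNat = arr.length := by omega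
  rw [h1, List.map_map, ← sum_icnt arr]
  congr 1
  apply List.map_congr_left
  intro k _
  simp only [Function.comp, zero_add]
  rw [gA_natCast]

theorem A_side : ∀ flat : List Int, inversion_parity flat = par (invc (flat.filter (fun x => x ≠ 0))) := by
  intro flat
  calc inversion_parity flat
      = PySem.Int.bxor 0 (par (((PySem.List.pyRange 0 ((flat.filter (fun x => x ≠ 0)).length : Int) 1).map
          (gA (flat.filter (fun x => x ≠ 0)))).sum)) :=
        outer_loop (flat.filter (fun x => x ≠ 0)) _ 0 (Or.inl rfl)
    _ = par (invc (flat.filter (fun x => x ≠ 0))) := by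
        rw [sum_gA]
        unfold par
        rw [show (0 : Int) = ((0 : ℕ) : Int) from rfl, PySem.Int.bxor_natCast]
        simp

-- ---------- merge sort lemmas (B side) ----------

theorem cross_nil_left (rs : List Int) : cross [] rs = 0 := by
  simp [cross]

theorem cross_cons_right (ls : List Int) (b : Int) (rs : List Int) :
    cross ls (b :: rs) = ls.countP (fun a => decide (b < a)) + cross ls rs := by
  simp [cross]

theorem cross_cons_left (a : Int) (ls rs : List Int) :
    cross (a :: ls) rs = rs.countP (fun b => decide (b < a)) + cross ls rs := by
  induction rs with
  | nil => simp [cross]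
  | cons b rs ih =>
    rw [cross_cons_right, ih, cross_cons_right, List.countP_cons, List.countP_cons]
    ring

theorem cross_perm_left {ls ls' : List Int} (h : ls.Perm ls') (rs : List Int) :
    cross ls rs = cross ls' rs := by
  unfold cross
  congr 1
  apply List.map_congr_left
  intro b _
  exact h.countP_eq _

theorem cross_perm_right (ls : List Int) {rs rs' : List Int} (h : rs.Perm rs') :
    cross ls rs = cross ls rs' :=
  (h.map _).sum_eq

theorem invc_append (l1 l2 : List Int) :
    invc (l1 ++ l2) = invc l1 + invc l2 + cross l1 l2 := by
  induction l1 with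
  | nil => simp [invc, cross_nil_left]
  | cons x l1 ih =>
    simp only [List.cons_append, invc, List.countP_append, ih, cross_cons_left]
    omega

theorem mergeInv_spec : ∀ (n : ℕ) (ls rs : List Int), ls.length + rs.length ≤ n →
    ls.Pairwise (· ≤ ·) → rs.Pairwise (· ≤ ·) →
    (mergeInv ls rs).1.Perm (ls ++ rs) ∧ (mergeInv ls rs).1.Pairwise (· ≤ ·) ∧
      (mergeInv ls rs).2 = (cross ls rs : Int) := by
  intro n
  induction n with
  | zero =>
    intro ls rs h hl hr
    cases ls <;> cases rs <;> simp_all [mergeInv, cross]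
  | succ n ih =>
    intro ls rs h hl hr
    match ls, rs with
    | [], rs => simpa [mergeInv, cross_nil_left] using hr
    | a :: l, [] => simpa [mergeInv, cross] using hl
    | a :: l, b :: r =>
      rw [List.pairwise_cons] at hl hr
      by_cases hba : b < a
      · obtain ⟨hp, hs, hc⟩ := ih (a :: l) r (by simp at h ⊢; omega)
          (List.pairwise_cons.mpr hl) hr.2
        simp only [mergeInv, if_pos hba]
        refine ⟨?_, ?_, ?_⟩
        · exact (hp.cons b).trans List.perm_middle.symm
        · rw [List.pairwise_cons]
          refine ⟨?_, hs⟩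
          intro x hx
          rcases List.mem_append.mp (hp.mem_iff.mp hx) with h1 | h2
          · rcases List.mem_cons.mp h1 with h3 | h3
            · exact le_of_lt (h3 ▸ hba)
            · exact le_of_lt (lt_of_lt_of_le hba (hl.1 x h3))
          · exact hr.1 x h2
        · rw [hc, cross_cons_right]
          have hcount : (a :: l).countP (fun x => decide (b < x)) = (a :: l).length := by
            apply List.countP_eq_length.mpr
            intro x hx
            rcases List.mem_cons.mp hx with h3 | h3
            · simp [h3 ▸ hba]
            · simp [lt_of_lt_of_le hba (hl.1 x h3)]
          push_cast [hcount]
          ring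
      · have hab : a ≤ b := Int.not_lt.mp hba
        obtain ⟨hp, hs, hc⟩ := ih l (b :: r) (by simp at h ⊢; omega)
          hl.2 (List.pairwise_cons.mpr hr)
        simp only [mergeInv, if_neg hba]
        refine ⟨?_, ?_, ?_⟩
        · exact (hp.cons a).trans (List.Perm.refl _)
        · rw [List.pairwise_cons]
          refine ⟨?_, hs⟩
          intro x hx
          rcases List.mem_append.mp (hp.mem_iff.mp hx) with h1 | h2
          · exact hl.1 x h1
          · rcases List.mem_cons.mp h2 with h3 | h3
            · exact h3 ▸ hab
            · exact le_trans hab (hr.1 x h3)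
        · rw [hc, cross_cons_left]
          have hcount : (b :: r).countP (fun y => decide (y < a)) = 0 := by
            apply List.countP_eq_zero.mpr
            intro x hx
            rcases List.mem_cons.mp hx with h3 | h3
            · simp [h3, hba]
            · simp
              exact le_trans hab (hr.1 x h3)
          rw [hcount]
          push_cast
          ring

theorem msortInv_spec : ∀ (n : ℕ) (l : List Int), l.length ≤ n →
    (msortInv l).1.Perm l ∧ (msortInv l).1.Pairwise (· ≤ ·) ∧ (msortInv l).2 = (invc l : Int) := by
  intro n
  induction n with
  | zero =>
    intro l h
    have : l = [] := List.length_eq_zero_iff.mp (by omega)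
    subst this
    simp [msortInv, invc]
  | succ n ih =>
    intro l hlen
    match l with
    | [] => simp [msortInv, invc]
    | [x] => simp [msortInv, invc]
    | a :: b :: t =>
      have hlen' : (a :: b :: t).length = t.length + 2 := by simp
      obtain ⟨p1p, p1s, p1c⟩ := ih ((a :: b :: t).take ((a :: b :: t).length / 2))
        (by simp [List.length_take] at hlen ⊢; omega)
      obtain ⟨p2p, p2s, p2c⟩ := ih ((a :: b :: t).drop ((a :: b :: t).length / 2))
        (by simp at hlen ⊢; omega)
      obtain ⟨mp, ms, mc⟩ := mergeInv_spec
        ((msortInv ((a :: b :: t).take ((a :: b :: t).length / 2))).1.length +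
          (msortInv ((a :: b :: t).drop ((a :: b :: t).length / 2))).1.length)
        _ _ le_rfl p1s p2s
      simp only [msortInv]
      refine ⟨?_, ms, ?_⟩
      · exact mp.trans ((p1p.append p2p).trans (by rw [List.take_append_drop]))
      · rw [mc, p1c, p2c]
        rw [cross_perm_left p1p, cross_perm_right _ p2p]
        have := invc_append ((a :: b :: t).take ((a :: b :: t).length / 2))
          ((a :: b :: t).drop ((a :: b :: t).length / 2))
        rw [List.take_append_drop] at this
        rw [show invc (a :: b :: t) = _ from this]
        push_cast
        ring

theorem B_side : ∀ flat : List Int, inversion_parity_alt flat = par (invc (flat.filter (fun x => x ≠ 0))) := by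
  intro flat
  show PySem.Int.mod (msortInv (flat.filter (fun x => x ≠ 0))).2 2 = _
  rw [(msortInv_spec (flat.filter (fun x => x ≠ 0)).length _ le_rfl).2.2]
  unfold par
  simp only [PySem.Int.mod]
  rw [Int.fmod_eq_emod]
  simp

-- ===== VERDICT (by name: the statement is the Claim_ definition above) =====
theorem inversion_parity_spec : Claim_equal_inversion_parity := by
  intro flat _
  unfold Spec_inversion_parity
  rw [A_side, B_side]
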